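-- pv_equiv track=rewrite | github.com/MKanaar/Advent-of-code-2025 | 09/script2.py | process
-- ===== SOURCE A (Python) =====
-- def get_green_tiles_on_path(red_tiles: list[tuple[int, int]]) -> list[tuple[int, int]]:
--     green_tiles: list[tuple[int, int]] = []
--
--     for i in range(len(red_tiles)):
--         for j in range(i + 1, len(red_tiles) + 1):
--             j %= len(red_tiles)
--
--             tile1 = red_tiles[i]
--             tile2 = red_tiles[j]
--
--             if tile1[0] == tile2[0]:
--                 col = tile1[0]
--                 for row in range(min(tile1[1], tile2[1]) + 1, max(tile1[1], tile2[1])):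
--                     green_tiles.append((col, row))
--
--             elif tile1[1] == tile2[1]:
--                 row = tile1[1]
--                 for col in range(min(tile1[0], tile2[0]) + 1, max(tile1[0], tile2[0])):
--                     green_tiles.append((col, row))
--
--     return green_tiles
--
-- def other_red_or_green_tiles_in_area(
--     index1: int,
--     index2: int,
--     red_tiles: list[tuple[int, int]],
--     green_tiles: list[tuple[int, int]],
-- ) -> bool:
--     tile1 = red_tiles[index1]
--     tile2 = red_tiles[index2]
--
--     x1 = min(tile1[0], tile2[0]) + 1
--     x2 = max(tile1[0], tile2[0]) - 1
--     y1 = min(tile1[1], tile2[1]) + 1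
--     y2 = max(tile1[1], tile2[1]) - 1
--
--     if x1 > x2 or y1 > y2:
--         return False
--
--     for tile in red_tiles:
--         if tile == tile1 or tile == tile2:
--             continue
--         if x1 <= tile[0] <= x2 and y1 <= tile[1] <= y2:
--             return True
--
--     for tile in green_tiles:
--         if x1 <= tile[0] <= x2 and y1 <= tile[1] <= y2:
--             return True
--
--     return False
--
-- def get_area(tile1: tuple[int, int], tile2: tuple[int, int]) -> int:
--     width = abs(tile1[0] - tile2[0]) + 1
--     height = abs(tile1[1] - tile2[1]) + 1
--     return width * height
--
-- def process(red_tiles: list[tuple[int, int]]) -> int: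
--     biggest_area = -1
--     green_tiles = get_green_tiles_on_path(red_tiles)
--
--     for i in range(len(red_tiles) - 1):
--         for j in range(i + 1, len(red_tiles)):
--             area = get_area(red_tiles[i], red_tiles[j])
--             if area > biggest_area and not other_red_or_green_tiles_in_area(
--                 i, j, red_tiles, green_tiles
--             ):
--                 biggest_area = area
--
--     return biggest_area
-- ===== SOURCE B (Python) =====
-- def process(red_tiles):
--     n = len(red_tiles)
--
--     # The open "between" segment of every axis-aligned pair of red tiles, kept as
--     # an interval record instead of materialising every lattice point.
--     segs = []
--     for p in red_tiles:
--         for q in red_tiles: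
--             if p[0] == q[0]:
--                 lo, hi = min(p[1], q[1]) + 1, max(p[1], q[1]) - 1
--                 if lo <= hi:
--                     segs.append((True, p[0], lo, hi))
--             elif p[1] == q[1]:
--                 lo, hi = min(p[0], q[0]) + 1, max(p[0], q[0]) - 1
--                 if lo <= hi:
--                     segs.append((False, p[1], lo, hi))
--
--     best = -1
--     for i in range(n - 1):
--         t1 = red_tiles[i]
--         for j in range(i + 1, n):
--             t2 = red_tiles[j]
--             area = (abs(t1[0] - t2[0]) + 1) * (abs(t1[1] - t2[1]) + 1)
--             x1, x2 = min(t1[0], t2[0]) + 1, max(t1[0], t2[0]) - 1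
--             y1, y2 = min(t1[1], t2[1]) + 1, max(t1[1], t2[1]) - 1
--             if area > best and not (
--                 any(
--                     t != t1 and t != t2 and x1 <= t[0] <= x2 and y1 <= t[1] <= y2
--                     for t in red_tiles
--                 )
--                 or any(
--                     (x1 <= c <= x2 and max(lo, y1) <= min(hi, y2)) if vert
--                     else (y1 <= c <= y2 and max(lo, x1) <= min(hi, x2))
--                     for (vert, c, lo, hi) in segs
--                 )
--             ):
--                 best = area
--     return best
-- ===== Notes on version B (the rewrite author's own statement) =====
-- stated objective: alternative
-- what changed: Instead of materialising every green lattice point between aligned red-tile pairs and scanning that point list for each candidate rectangle, B stores each aligned pair as one O(1) open-interval segment record and tests rectangle emptiness by interval-overlap arithmetic against those segments.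
import Mathlib
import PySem

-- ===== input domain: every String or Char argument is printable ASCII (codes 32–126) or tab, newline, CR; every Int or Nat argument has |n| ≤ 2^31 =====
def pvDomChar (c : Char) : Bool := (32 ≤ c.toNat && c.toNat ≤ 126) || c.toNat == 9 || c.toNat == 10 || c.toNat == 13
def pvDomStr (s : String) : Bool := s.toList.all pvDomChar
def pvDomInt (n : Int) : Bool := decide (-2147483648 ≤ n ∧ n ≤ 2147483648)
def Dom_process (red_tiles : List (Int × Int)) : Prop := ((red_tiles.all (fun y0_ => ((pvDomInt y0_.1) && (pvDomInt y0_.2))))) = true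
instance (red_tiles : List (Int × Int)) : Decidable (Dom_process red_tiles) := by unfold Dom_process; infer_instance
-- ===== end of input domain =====

-- B replaces A's materialised list of green lattice points between axis-aligned red pairs
-- by one open-interval segment record per aligned pair, testing rectangle emptiness by
-- interval-overlap arithmetic against those records (a different algorithm, same cost here).

-- ===== PORT A =====
-- every index fed to pyGetD below is in range in A (loop bounds / j %= len), so the default is never used
def get_green_tiles_on_path (red_tiles : List (Int × Int)) : List (Int × Int) :=
  (PySem.List.pyRange 0 (red_tiles.length : Int) 1).foldl (fun green i =>
    (PySem.List.pyRange (i + 1) ((red_tiles.length : Int) + 1) 1).foldl (fun green j0 =>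
      let j := PySem.Int.mod j0 (red_tiles.length : Int)
      let tile1 := PySem.List.pyGetD red_tiles i (0, 0)
      let tile2 := PySem.List.pyGetD red_tiles j (0, 0)
      if tile1.1 = tile2.1 then
        green ++ (PySem.List.pyRange (min tile1.2 tile2.2 + 1) (max tile1.2 tile2.2) 1).map
          (fun row => (tile1.1, row))
      else if tile1.2 = tile2.2 then
        green ++ (PySem.List.pyRange (min tile1.1 tile2.1 + 1) (max tile1.1 tile2.1) 1).map
          (fun col => (col, tile1.2))
      else green) green) []

def other_red_or_green_tiles_in_area (index1 index2 : Int)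
    (red_tiles green_tiles : List (Int × Int)) : Bool :=
  let tile1 := PySem.List.pyGetD red_tiles index1 (0, 0)
  let tile2 := PySem.List.pyGetD red_tiles index2 (0, 0)
  let x1 := min tile1.1 tile2.1 + 1
  let x2 := max tile1.1 tile2.1 - 1
  let y1 := min tile1.2 tile2.2 + 1
  let y2 := max tile1.2 tile2.2 - 1
  if x1 > x2 ∨ y1 > y2 then false
  else
    (red_tiles.any fun tile =>
      !(tile == tile1 || tile == tile2) &&
        decide (x1 ≤ tile.1 ∧ tile.1 ≤ x2 ∧ y1 ≤ tile.2 ∧ tile.2 ≤ y2)) ||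
    (green_tiles.any fun tile =>
      decide (x1 ≤ tile.1 ∧ tile.1 ≤ x2 ∧ y1 ≤ tile.2 ∧ tile.2 ≤ y2))

def get_area (tile1 tile2 : Int × Int) : Int :=
  (|tile1.1 - tile2.1| + 1) * (|tile1.2 - tile2.2| + 1)

def process (red_tiles : List (Int × Int)) : Int :=
  let green_tiles := get_green_tiles_on_path red_tiles
  (PySem.List.pyRange 0 ((red_tiles.length : Int) - 1) 1).foldl (fun best i =>
    (PySem.List.pyRange (i + 1) (red_tiles.length : Int) 1).foldl (fun best j =>
      let area := get_area (PySem.List.pyGetD red_tiles i (0, 0))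
        (PySem.List.pyGetD red_tiles j (0, 0))
      if area > best ∧ other_red_or_green_tiles_in_area i j red_tiles green_tiles = false
      then area else best) best) (-1)

-- ===== PORT B =====
def segsOf (red_tiles : List (Int × Int)) : List (Bool × Int × Int × Int) :=
  red_tiles.foldl (fun segs p =>
    red_tiles.foldl (fun segs q =>
      if p.1 = q.1 then
        if min p.2 q.2 + 1 ≤ max p.2 q.2 - 1 then
          segs ++ [(true, p.1, min p.2 q.2 + 1, max p.2 q.2 - 1)] else segs
      else if p.2 = q.2 then
        if min p.1 q.1 + 1 ≤ max p.1 q.1 - 1 then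
          segs ++ [(false, p.2, min p.1 q.1 + 1, max p.1 q.1 - 1)] else segs
      else segs) segs) []

def process_alt (red_tiles : List (Int × Int)) : Int :=
  let segs := segsOf red_tiles
  (PySem.List.pyRange 0 ((red_tiles.length : Int) - 1) 1).foldl (fun best i =>
    let t1 := PySem.List.pyGetD red_tiles i (0, 0)
    (PySem.List.pyRange (i + 1) (red_tiles.length : Int) 1).foldl (fun best j =>
      let t2 := PySem.List.pyGetD red_tiles j (0, 0)
      let area := (|t1.1 - t2.1| + 1) * (|t1.2 - t2.2| + 1)
      let x1 := min t1.1 t2.1 + 1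
      let x2 := max t1.1 t2.1 - 1
      let y1 := min t1.2 t2.2 + 1
      let y2 := max t1.2 t2.2 - 1
      if area > best ∧
          ((red_tiles.any fun t =>
            !(t == t1) && !(t == t2) &&
              decide (x1 ≤ t.1 ∧ t.1 ≤ x2 ∧ y1 ≤ t.2 ∧ t.2 ≤ y2)) ||
          (segs.any fun s =>
            if s.1 then decide (x1 ≤ s.2.1 ∧ s.2.1 ≤ x2 ∧ max s.2.2.1 y1 ≤ min s.2.2.2 y2)
            else decide (y1 ≤ s.2.1 ∧ s.2.1 ≤ y2 ∧ max s.2.2.1 x1 ≤ min s.2.2.2 x2))) = false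
      then area else best) best) (-1)

-- ===== PRECONDITION & SPEC =====
def Spec_process (red_tiles : List (Int × Int)) (out : Int) : Prop := out = process_alt red_tiles
instance (red_tiles : List (Int × Int)) (out : Int) : Decidable (Spec_process red_tiles out) := by unfold Spec_process; infer_instance

-- ===== CLAIM (what is proved, stated in full; the proofs are below) =====
def Claim_equal_process : Prop := ∀ (red_tiles : List (Int × Int)), Dom_process red_tiles → Spec_process red_tiles (process red_tiles)

-- ===== LEMMAS AND PROOFS =====

-- the strictly-between lattice points of a pair, as A generates them
def segPts (p q : Int × Int) : List (Int × Int) :=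
  if p.1 = q.1 then
    (PySem.List.pyRange (min p.2 q.2 + 1) (max p.2 q.2) 1).map (fun r => (p.1, r))
  else if p.2 = q.2 then
    (PySem.List.pyRange (min p.1 q.1 + 1) (max p.1 q.1) 1).map (fun c => (c, p.2))
  else []

-- the segment record of a pair, as B generates it
def segRec (p q : Int × Int) : List (Bool × Int × Int × Int) :=
  if p.1 = q.1 then
    if min p.2 q.2 + 1 ≤ max p.2 q.2 - 1 then
      [(true, p.1, min p.2 q.2 + 1, max p.2 q.2 - 1)] else []
  else if p.2 = q.2 then
    if min p.1 q.1 + 1 ≤ max p.1 q.1 - 1 then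
      [(false, p.2, min p.1 q.1 + 1, max p.1 q.1 - 1)] else []
  else []

theorem foldl_seg {α β : Type} (l : List α) (acc : List β) (f : α → List β)
    (body : List β → α → List β) (h : ∀ acc x, x ∈ l → body acc x = acc ++ f x) :
    l.foldl body acc = acc ++ l.flatMap f := by
  rw [PySem.List.foldl_congr_mem l body (fun acc x => acc ++ f x) acc h,
    PySem.List.foldl_append_eq_flatMap]

theorem green_eq (red : List (Int × Int)) :
    get_green_tiles_on_path red =
      (PySem.List.pyRange 0 (red.length : Int) 1).flatMap (fun i =>
        (PySem.List.pyRange (i + 1) ((red.length : Int) + 1) 1).flatMap (fun j0 =>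
          segPts (PySem.List.pyGetD red i (0, 0))
            (PySem.List.pyGetD red (PySem.Int.mod j0 (red.length : Int)) (0, 0)))) := by
  unfold get_green_tiles_on_path
  have inner : ∀ (acc : List (Int × Int)) (i : Int),
      ((PySem.List.pyRange (i + 1) ((red.length : Int) + 1) 1).foldl (fun green j0 =>
        let j := PySem.Int.mod j0 (red.length : Int)
        let tile1 := PySem.List.pyGetD red i (0, 0)
        let tile2 := PySem.List.pyGetD red j (0, 0)
        if tile1.1 = tile2.1 then
          green ++ (PySem.List.pyRange (min tile1.2 tile2.2 + 1) (max tile1.2 tile2.2) 1).map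
            (fun row => (tile1.1, row))
        else if tile1.2 = tile2.2 then
          green ++ (PySem.List.pyRange (min tile1.1 tile2.1 + 1) (max tile1.1 tile2.1) 1).map
            (fun col => (col, tile1.2))
        else green) acc) =
      acc ++ (PySem.List.pyRange (i + 1) ((red.length : Int) + 1) 1).flatMap (fun j0 =>
        segPts (PySem.List.pyGetD red i (0, 0))
          (PySem.List.pyGetD red (PySem.Int.mod j0 (red.length : Int)) (0, 0))) := by
    intro acc i
    refine foldl_seg _ _ _ _ (fun acc2 j0 _ => ?_)
    simp only [segPts]
    split_ifs <;> simp
  rw [foldl_seg _ _ _ _ (fun acc i _ => inner acc i)]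
  simp

theorem segPts_comm (p q : Int × Int) : segPts p q = segPts q p := by
  unfold segPts
  by_cases h1 : p.1 = q.1
  · rw [if_pos h1, if_pos h1.symm, min_comm, max_comm, h1]
  · rw [if_neg h1, if_neg (Ne.symm h1)]
    by_cases h2 : p.2 = q.2
    · rw [if_pos h2, if_pos h2.symm, min_comm, max_comm, h2]
    · rw [if_neg h2, if_neg (Ne.symm h2)]

theorem segPts_self (p : Int × Int) : segPts p p = [] := by
  simp [segPts, PySem.List.pyRange_one_eq_nil (by omega : (p.2 : Int) ≤ p.2 + 1)]

theorem pyGetD_nat (red : List (Int × Int)) (a : Nat) (h : a < red.length) :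
    PySem.List.pyGetD red (a : Int) (0, 0) = red[a] := by
  simp [PySem.List.pyGetD_natCast, List.getD_eq_getElem?_getD, List.getElem?_eq_getElem h]

theorem mem_green (red : List (Int × Int)) (g : Int × Int) :
    g ∈ get_green_tiles_on_path red ↔ ∃ p ∈ red, ∃ q ∈ red, g ∈ segPts p q := by
  rw [green_eq]
  simp only [List.mem_flatMap, PySem.List.mem_pyRange_one]
  constructor
  · rintro ⟨i, ⟨hi0, hin⟩, j0, ⟨hj1, hj2⟩, hg⟩
    have hn : 0 < (red.length : Int) := lt_of_le_of_lt hi0 hin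
    have hm0 : 0 ≤ PySem.Int.mod j0 (red.length : Int) := by
      rw [PySem.Int.mod_eq_emod_of_pos hn]; exact Int.emod_nonneg _ (by omega)
    have hm1 : PySem.Int.mod j0 (red.length : Int) < (red.length : Int) := by
      rw [PySem.Int.mod_eq_emod_of_pos hn]; exact Int.emod_lt_of_pos _ hn
    exact ⟨_, PySem.List.pyGetD_mem red (0, 0) (by simp [PySem.Raise.InRange]; omega),
      _, PySem.List.pyGetD_mem red (0, 0) (by simp [PySem.Raise.InRange]; omega), hg⟩
  · rintro ⟨p, hp, q, hq, hg⟩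
    obtain ⟨a, ha, rfl⟩ := List.mem_iff_getElem.mp hp
    obtain ⟨b, hb, rfl⟩ := List.mem_iff_getElem.mp hq
    rcases Nat.lt_trichotomy a b with h | h | h
    · refine ⟨(a : Int), ⟨by omega, by exact_mod_cast ha⟩, (b : Int),
        ⟨by exact_mod_cast h, by omega⟩, ?_⟩
      have hmod : PySem.Int.mod (b : Int) (red.length : Int) = (b : Int) := by
        rw [PySem.Int.mod_eq_emod_of_pos (by omega)]
        exact Int.emod_eq_of_lt (by omega) (by exact_mod_cast hb)
      rw [hmod, pyGetD_nat _ _ ha, pyGetD_nat _ _ hb]; exact hg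
    · exfalso; subst h; rw [segPts_self] at hg; simp at hg
    · refine ⟨(b : Int), ⟨by omega, by exact_mod_cast hb⟩, (a : Int),
        ⟨by exact_mod_cast h, by omega⟩, ?_⟩
      have hmod : PySem.Int.mod (a : Int) (red.length : Int) = (a : Int) := by
        rw [PySem.Int.mod_eq_emod_of_pos (by omega)]
        exact Int.emod_eq_of_lt (by omega) (by exact_mod_cast ha)
      rw [hmod, pyGetD_nat _ _ ha, pyGetD_nat _ _ hb, segPts_comm]; exact hg

theorem segs_eq (red : List (Int × Int)) :
    segsOf red = red.flatMap (fun p => red.flatMap (fun q => segRec p q)) := by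
  unfold segsOf
  have inner : ∀ (acc : List (Bool × Int × Int × Int)) (p : Int × Int),
      (red.foldl (fun segs q =>
        if p.1 = q.1 then
          if min p.2 q.2 + 1 ≤ max p.2 q.2 - 1 then
            segs ++ [(true, p.1, min p.2 q.2 + 1, max p.2 q.2 - 1)] else segs
        else if p.2 = q.2 then
          if min p.1 q.1 + 1 ≤ max p.1 q.1 - 1 then
            segs ++ [(false, p.2, min p.1 q.1 + 1, max p.1 q.1 - 1)] else segs
        else segs) acc) = acc ++ red.flatMap (fun q => segRec p q) := by
    intro acc p
    refine foldl_seg _ _ _ _ (fun acc2 q _ => ?_)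
    simp only [segRec]
    split_ifs <;> simp
  rw [foldl_seg _ _ _ _ (fun acc p _ => inner acc p)]
  simp

theorem pair_bridge (p q : Int × Int) (x1 x2 y1 y2 : Int) :
    (∃ s ∈ segRec p q,
        (if s.1 then decide (x1 ≤ s.2.1 ∧ s.2.1 ≤ x2 ∧ max s.2.2.1 y1 ≤ min s.2.2.2 y2)
         else decide (y1 ≤ s.2.1 ∧ s.2.1 ≤ y2 ∧ max s.2.2.1 x1 ≤ min s.2.2.2 x2)) = true) ↔
      (∃ g ∈ segPts p q, x1 ≤ g.1 ∧ g.1 ≤ x2 ∧ y1 ≤ g.2 ∧ g.2 ≤ y2) := by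
  unfold segRec segPts
  split_ifs with h1 h2 h3 h4
  · constructor
    · rintro ⟨s, hs0, hs⟩
      simp at hs0
      subst hs0
      simp at hs
      refine ⟨(p.1, max (min p.2 q.2 + 1) y1),
        List.mem_map.mpr ⟨max (min p.2 q.2 + 1) y1, PySem.List.mem_pyRange_one.mpr (by omega), rfl⟩,
        by simp; omega⟩
    · rintro ⟨g, hg0, hg⟩
      obtain ⟨r, hr, rfl⟩ := List.mem_map.mp hg0
      rw [PySem.List.mem_pyRange_one] at hr
      simp at hg
      refine ⟨(true, p.1, min p.2 q.2 + 1, max p.2 q.2 - 1), by simp, by simp; omega⟩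
  · rw [PySem.List.pyRange_one_eq_nil (by omega)]
    simp
  · constructor
    · rintro ⟨s, hs0, hs⟩
      simp at hs0
      subst hs0
      simp at hs
      refine ⟨(max (min p.1 q.1 + 1) x1, p.2),
        List.mem_map.mpr ⟨max (min p.1 q.1 + 1) x1, PySem.List.mem_pyRange_one.mpr (by omega), rfl⟩,
        by simp; omega⟩
    · rintro ⟨g, hg0, hg⟩
      obtain ⟨c, hc, rfl⟩ := List.mem_map.mp hg0
      rw [PySem.List.mem_pyRange_one] at hc
      simp at hg
      refine ⟨(false, p.2, min p.1 q.1 + 1, max p.1 q.1 - 1), by simp, by simp; omega⟩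
  · rw [PySem.List.pyRange_one_eq_nil (by omega)]
    simp
  · simp

theorem blocked_eq (red : List (Int × Int)) (i j : Int)
    (t1 t2 : Int × Int) (h1 : PySem.List.pyGetD red i (0, 0) = t1)
    (h2 : PySem.List.pyGetD red j (0, 0) = t2) :
    other_red_or_green_tiles_in_area i j red (get_green_tiles_on_path red) =
      ((red.any fun t =>
          !(t == t1) && !(t == t2) &&
            decide (min t1.1 t2.1 + 1 ≤ t.1 ∧ t.1 ≤ max t1.1 t2.1 - 1 ∧
              min t1.2 t2.2 + 1 ≤ t.2 ∧ t.2 ≤ max t1.2 t2.2 - 1)) ||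
        ((segsOf red).any fun s =>
          if s.1 then decide (min t1.1 t2.1 + 1 ≤ s.2.1 ∧ s.2.1 ≤ max t1.1 t2.1 - 1 ∧
            max s.2.2.1 (min t1.2 t2.2 + 1) ≤ min s.2.2.2 (max t1.2 t2.2 - 1))
          else decide (min t1.2 t2.2 + 1 ≤ s.2.1 ∧ s.2.1 ≤ max t1.2 t2.2 - 1 ∧
            max s.2.2.1 (min t1.1 t2.1 + 1) ≤ min s.2.2.2 (max t1.1 t2.1 - 1)))) := by
  unfold other_red_or_green_tiles_in_area
  rw [h1, h2]
  by_cases hd : max t1.1 t2.1 - 1 < min t1.1 t2.1 + 1 ∨ max t1.2 t2.2 - 1 < min t1.2 t2.2 + 1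
  · rw [if_pos hd]
    symm
    simp only [Bool.or_eq_false_iff, List.any_eq_false]
    constructor
    · intro t ht
      rcases t with ⟨u, v⟩
      simp
      intro _ _
      omega
    · intro s hs
      rcases s with ⟨b, c, lo, hi⟩
      cases b <;> simp <;> omega
  · rw [if_neg hd]
    have hred : (red.any fun tile =>
        !(tile == t1 || tile == t2) &&
          decide (min t1.1 t2.1 + 1 ≤ tile.1 ∧ tile.1 ≤ max t1.1 t2.1 - 1 ∧
            min t1.2 t2.2 + 1 ≤ tile.2 ∧ tile.2 ≤ max t1.2 t2.2 - 1)) =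
        (red.any fun t =>
          !(t == t1) && !(t == t2) &&
            decide (min t1.1 t2.1 + 1 ≤ t.1 ∧ t.1 ≤ max t1.1 t2.1 - 1 ∧
              min t1.2 t2.2 + 1 ≤ t.2 ∧ t.2 ≤ max t1.2 t2.2 - 1)) := by
      apply congrArg
      funext t
      cases ht1 : t == t1 <;> cases ht2 : t == t2 <;> simp
    rw [hred]
    apply congrArg
    rw [Bool.eq_iff_iff]
    simp only [List.any_eq_true, segs_eq, List.mem_flatMap]
    constructor
    · rintro ⟨g, hg, hin⟩
      simp only [decide_eq_true_eq] at hin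
      obtain ⟨p, hp, q, hq, hgs⟩ := (mem_green red g).mp hg
      obtain ⟨s, hs, hcond⟩ := (pair_bridge p q _ _ _ _).mpr ⟨g, hgs, hin⟩
      exact ⟨s, ⟨p, hp, q, hq, hs⟩, hcond⟩
    · rintro ⟨s, ⟨p, hp, q, hq, hs⟩, hcond⟩
      obtain ⟨g, hgs, hin⟩ := (pair_bridge p q _ _ _ _).mp ⟨s, hs, hcond⟩
      exact ⟨g, (mem_green red g).mpr ⟨p, hp, q, hq, hgs⟩, by simp only [decide_eq_true_eq]; exact hin⟩

theorem step_eq (red : List (Int × Int)) (best i j : Int) :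
    (if get_area (PySem.List.pyGetD red i (0, 0)) (PySem.List.pyGetD red j (0, 0)) > best ∧
        other_red_or_green_tiles_in_area i j red (get_green_tiles_on_path red) = false
      then get_area (PySem.List.pyGetD red i (0, 0)) (PySem.List.pyGetD red j (0, 0)) else best) =
    (if ((|(PySem.List.pyGetD red i (0, 0)).1 - (PySem.List.pyGetD red j (0, 0)).1| + 1) * (|(PySem.List.pyGetD red i (0, 0)).2 - (PySem.List.pyGetD red j (0, 0)).2| + 1)) > best ∧ ((red.any fun t =>
          !(t == (PySem.List.pyGetD red i (0, 0))) && !(t == (PySem.List.pyGetD red j (0, 0))) &&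
            decide (min (PySem.List.pyGetD red i (0, 0)).1 (PySem.List.pyGetD red j (0, 0)).1 + 1 ≤ t.1 ∧ t.1 ≤ max (PySem.List.pyGetD red i (0, 0)).1 (PySem.List.pyGetD red j (0, 0)).1 - 1 ∧
              min (PySem.List.pyGetD red i (0, 0)).2 (PySem.List.pyGetD red j (0, 0)).2 + 1 ≤ t.2 ∧ t.2 ≤ max (PySem.List.pyGetD red i (0, 0)).2 (PySem.List.pyGetD red j (0, 0)).2 - 1)) ||
        ((segsOf red).any fun s =>
          if s.1 then decide (min (PySem.List.pyGetD red i (0, 0)).1 (PySem.List.pyGetD red j (0, 0)).1 + 1 ≤ s.2.1 ∧ s.2.1 ≤ max (PySem.List.pyGetD red i (0, 0)).1 (PySem.List.pyGetD red j (0, 0)).1 - 1 ∧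
            max s.2.2.1 (min (PySem.List.pyGetD red i (0, 0)).2 (PySem.List.pyGetD red j (0, 0)).2 + 1) ≤ min s.2.2.2 (max (PySem.List.pyGetD red i (0, 0)).2 (PySem.List.pyGetD red j (0, 0)).2 - 1))
          else decide (min (PySem.List.pyGetD red i (0, 0)).2 (PySem.List.pyGetD red j (0, 0)).2 + 1 ≤ s.2.1 ∧ s.2.1 ≤ max (PySem.List.pyGetD red i (0, 0)).2 (PySem.List.pyGetD red j (0, 0)).2 - 1 ∧
            max s.2.2.1 (min (PySem.List.pyGetD red i (0, 0)).1 (PySem.List.pyGetD red j (0, 0)).1 + 1) ≤ min s.2.2.2 (max (PySem.List.pyGetD red i (0, 0)).1 (PySem.List.pyGetD red j (0, 0)).1 - 1)))) = false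
      then ((|(PySem.List.pyGetD red i (0, 0)).1 - (PySem.List.pyGetD red j (0, 0)).1| + 1) * (|(PySem.List.pyGetD red i (0, 0)).2 - (PySem.List.pyGetD red j (0, 0)).2| + 1)) else best) := by
  rw [blocked_eq red i j _ _ rfl rfl]
  unfold get_area
  rfl

-- ===== VERDICT (by name: the statement is the Claim_ definition above) =====
theorem process_spec : Claim_equal_process := by
  intro red _
  unfold Spec_process process process_alt
  refine PySem.List.foldl_congr_mem _ _ _ _ (fun best i _ => ?_)
  refine PySem.List.foldl_congr_mem _ _ _ _ (fun best2 j _ => ?_)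
  exact step_eq red best2 i j
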